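-- pv_equiv track=rewrite | github.com/shilena91/challenge_exercises | FrogRiverOne/solution.py | solution
-- ===== SOURCE A (Python) =====
-- def solution(X, A):
--     if (X <= 0 or len(A) == 0):
--         return (-1)
--     position = 0
--     i = 1
--     if A[0] <= X:
--         position += 1
--         if position == X:
--             return (0)
--     for nb in A[1:]:
--         if nb <= X and nb not in A[:i]:
--             position += 1
--         if position == X:
--             return (i)
--         i += 1
--     return (-1)
-- ===== SOURCE B (Python) =====
-- def solution(X, A):
--     first = {}
--     for i, v in reversed(list(enumerate(A))):
--         if v <= X:
--             first[v] = i
--     idxs = sorted(first.values())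
--     return idxs[X - 1] if 1 <= X <= len(idxs) else -1
-- ===== Notes on version B (the rewrite author's own statement) =====
-- stated objective: faster
-- what changed: Replaces A's early-returning forward scan with its quadratic 'nb not in A[:i]' prefix re-scan by a reverse traversal that overwrites a dict so each distinct value <= X ends up mapped to its first-occurrence index, then sorts those indices and picks the X-th one directly.
import Mathlib
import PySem

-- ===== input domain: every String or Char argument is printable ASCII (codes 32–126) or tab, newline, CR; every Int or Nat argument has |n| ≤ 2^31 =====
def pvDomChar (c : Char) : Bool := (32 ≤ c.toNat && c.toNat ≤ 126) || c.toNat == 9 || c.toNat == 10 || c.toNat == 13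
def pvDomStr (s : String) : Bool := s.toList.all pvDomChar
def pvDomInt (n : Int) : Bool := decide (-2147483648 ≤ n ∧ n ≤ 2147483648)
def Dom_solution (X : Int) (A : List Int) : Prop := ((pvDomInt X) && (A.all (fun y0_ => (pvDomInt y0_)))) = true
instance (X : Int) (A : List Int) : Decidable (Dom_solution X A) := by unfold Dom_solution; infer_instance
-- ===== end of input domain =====

-- B replaces A's early-returning forward scan (with its quadratic `nb not in A[:i]` prefix re-scan)
-- by a reverse traversal overwriting a dict (each distinct value ≤ X ends mapped to its first-occurrence
-- index), then sorting those indices and picking the X-th one (objective: faster).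

-- ===== PORT A =====
-- A's for-loop over A[1:] with index i and counter `position`; `A[:i]` is kept as a slice of the full list A0.
def solLoopA (A0 : List Int) (X : Int) : List Int → Int → Int → Int
  | [], _, _ => -1
  | nb :: t, i, position =>
    let position := if nb ≤ X ∧ nb ∉ PySem.List.slice A0 none (some i) then position + 1 else position
    if position = X then i else solLoopA A0 X t (i + 1) position

def solution (X : Int) (A : List Int) : Int :=
  if X ≤ 0 ∨ A.length = 0 then -1
  else
    match A with
    | [] => -1   -- unreachable: A is nonempty here (guard above)
    | a0 :: rest =>
      -- position = 0; i = 1; if A[0] <= X: position += 1; if position == X: return 0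
      if a0 ≤ X then
        if (0 : Int) + 1 = X then 0 else solLoopA (a0 :: rest) X rest 1 (0 + 1)
      else solLoopA (a0 :: rest) X rest 1 0

-- ===== PORT B =====
-- B's loop 'for i, v in reversed(list(enumerate(A))): if v <= X: first[v] = i', then sorted(first.values())
-- and 'idxs[X - 1] if 1 <= X <= len(idxs) else -1'.
def solution_alt (X : Int) (A : List Int) : Int :=
  let first := ((PySem.List.enumerate A).reverse).foldl
    (fun d p => if p.2 ≤ X then PySem.Dict.insert d p.2 p.1 else d) PySem.Dict.empty
  let idxs := PySem.List.sorted (PySem.Dict.values first) (fun x => x) false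
  if 1 ≤ X ∧ X ≤ (idxs.length : Int) then (PySem.List.pyGet? idxs (X - 1)).getD (-1) else -1

-- ===== PRECONDITION & SPEC =====
def Spec_solution (X : Int) (A : List Int) (out : Int) : Prop := out = solution_alt X A
instance (X : Int) (A : List Int) (out : Int) : Decidable (Spec_solution X A out) := by unfold Spec_solution; infer_instance

-- ===== CLAIM (what is proved, stated in full; the proofs are below) =====
def Claim_equal_solution : Prop := ∀ (X : Int) (A : List Int), Dom_solution X A → Spec_solution X A (solution X A)

-- ===== LEMMAS AND PROOFS =====

-- Ghost list: the first-occurrence indices of the distinct values ≤ X, in increasing order.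
-- `pre` is the prefix already processed, `i` the index of the head of the remaining list.
def Fidx (X : Int) : List Int → List Int → Int → List Int
  | [], _, _ => []
  | v :: t, pre, i =>
    if v ≤ X ∧ v ∉ pre then i :: Fidx X t (pre ++ [v]) (i + 1)
    else Fidx X t (pre ++ [v]) (i + 1)

theorem Fidx_ge (X : Int) (l : List Int) : ∀ (pre : List Int) (i : Int), ∀ j ∈ Fidx X l pre i, i ≤ j := by
  induction l with
  | nil => intro pre i j hj; simp [Fidx] at hj
  | cons v t ih =>
    intro pre i j hj
    simp only [Fidx] at hj
    split_ifs at hj with h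
    · rcases List.mem_cons.mp hj with rfl | hj
      · omega
      · have := ih (pre ++ [v]) (i + 1) j hj; omega
    · have := ih (pre ++ [v]) (i + 1) j hj; omega

theorem Fidx_pairwise (X : Int) (l : List Int) : ∀ (pre : List Int) (i : Int),
    (Fidx X l pre i).Pairwise (· < ·) := by
  induction l with
  | nil => intro pre i; simp [Fidx]
  | cons v t ih =>
    intro pre i
    simp only [Fidx]
    split_ifs with h
    · exact List.Pairwise.cons (fun j hj => by have := Fidx_ge X t (pre ++ [v]) (i + 1) j hj; omega)
        (ih (pre ++ [v]) (i + 1))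
    · exact ih (pre ++ [v]) (i + 1)

theorem Fidx_mem (X : Int) (l : List Int) : ∀ (pre : List Int) (i : Int) (j : Int),
    j ∈ Fidx X l pre i ↔
      ∃ v, v ≤ X ∧ v ∉ pre ∧ ∃ k : Nat, PySem.List.index? l v = some k ∧ j = i + (k : Int) := by
  induction l with
  | nil =>
    intro pre i j
    simp [Fidx, PySem.List.index?]
  | cons v t ih =>
    intro pre i j
    simp only [Fidx]
    constructor
    · intro hj
      split_ifs at hj with h
      · rcases List.mem_cons.mp hj with rfl | hj
        · exact ⟨v, h.1, h.2, 0, by simp [PySem.List.index?_eq_idxOf?, List.idxOf?, List.findIdx?_cons], by omega⟩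
        · obtain ⟨w, hwX, hwp, k, hk, hjk⟩ := (ih (pre ++ [v]) (i + 1) j).mp hj
          have hwv : w ≠ v := fun hwv => hwp (by simp [hwv])
          refine ⟨w, hwX, fun hw => hwp (by simp [hw]), k + 1, ?_, by push_cast; omega⟩
          rw [PySem.List.index?_cons_of_ne _ hwv.symm, hk]; rfl
      · obtain ⟨w, hwX, hwp, k, hk, hjk⟩ := (ih (pre ++ [v]) (i + 1) j).mp hj
        have hwv : w ≠ v := by
          rintro rfl
          rcases not_and_or.mp h with h' | h'
          · exact h' hwX
          · exact hwp (by simp [not_not.mp h'])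
        refine ⟨w, hwX, fun hw => hwp (by simp [hw]), k + 1, ?_, by push_cast; omega⟩
        rw [PySem.List.index?_cons_of_ne _ hwv.symm, hk]; rfl
    · rintro ⟨w, hwX, hwp, k, hk, hjk⟩
      by_cases hwv : w = v
      · subst hwv
        have hk0 : k = 0 := by
          have : PySem.List.index? (w :: t) w = some 0 := by
            simp [PySem.List.index?_eq_idxOf?, List.idxOf?, List.findIdx?_cons]
          rw [this] at hk; exact (Option.some_injective _ hk.symm)
        subst hk0
        have h : w ≤ X ∧ w ∉ pre := ⟨hwX, hwp⟩
        rw [if_pos h]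
        exact List.mem_cons.mpr (Or.inl (by omega))
      · rw [PySem.List.index?_cons_of_ne _ (Ne.symm hwv)] at hk
        rcases hk' : PySem.List.index? t w with _ | k'
        · rw [hk'] at hk; simp at hk
        · rw [hk'] at hk
          simp only [Option.map_some] at hk
          have hkk : k = k' + 1 := (Option.some_injective _ hk.symm)
          have hmem : j ∈ Fidx X t (pre ++ [v]) (i + 1) :=
            (ih (pre ++ [v]) (i + 1) j).mpr
              ⟨w, hwX, by simp [hwv, hwp], k', hk', by omega⟩
          split_ifs with h
          · exact List.mem_cons.mpr (Or.inr hmem)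
          · exact hmem

def Bdict (X : Int) (l : List Int) (s : Int) : PySem.Dict Int Int :=
  (PySem.List.enumerate l s).foldr (fun p d => if p.2 ≤ X then PySem.Dict.insert d p.2 p.1 else d) PySem.Dict.empty

theorem Bdict_cons (X v : Int) (t : List Int) (s : Int) :
    Bdict X (v :: t) s = if v ≤ X then (Bdict X t (s + 1)).insert v s else Bdict X t (s + 1) := by
  simp [Bdict, PySem.List.enumerate_cons]

theorem Bdict_get? (X : Int) (l : List Int) : ∀ (s : Int) (v : Int),
    (Bdict X l s).get? v = if v ≤ X then (PySem.List.index? l v).map (fun k : Nat => s + (k : Int)) else none := by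
  induction l with
  | nil =>
    intro s v
    simp [Bdict, PySem.List.enumerate, PySem.List.index?_eq_idxOf?, List.idxOf?, PySem.Dict.get?_empty]
  | cons a t ih =>
    intro s v
    rw [Bdict_cons]
    by_cases hv : v = a
    · subst hv
      have hidx : PySem.List.index? (v :: t) v = some 0 := by
        simp [PySem.List.index?_eq_idxOf?, List.idxOf?, List.findIdx?_cons]
      rw [hidx]
      by_cases ha : v ≤ X
      · rw [if_pos ha, if_pos ha, PySem.Dict.get?_insert_self]
        simp
      · rw [if_neg ha, if_neg ha, ih]
        rw [if_neg ha]
    · rw [PySem.List.index?_cons_of_ne _ (Ne.symm hv)]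
      have key : (Bdict X t (s + 1)).get? v =
          if v ≤ X then ((PySem.List.index? t v).map (fun k : Nat => k + 1)).map (fun k : Nat => s + (k : Int)) else none := by
        rw [ih]
        split_ifs with h
        · rcases hk : PySem.List.index? t v with _ | k <;> simp
          omega
        · rfl
      by_cases ha : a ≤ X
      · rw [if_pos ha, PySem.Dict.get?_insert_of_ne _ _ hv, key]
      · rw [if_neg ha, key]

theorem Bdict_nodup_keys (X : Int) (l : List Int) : ∀ (s : Int), (Bdict X l s).keys.Nodup := by
  induction l with
  | nil => intro s; simp [Bdict, PySem.List.enumerate]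
  | cons a t ih =>
    intro s
    rw [Bdict_cons]
    split_ifs with h
    · exact PySem.Dict.nodup_keys_insert _ _ _ (ih (s + 1))
    · exact ih (s + 1)

theorem Bdict_get?_some {X : Int} {l : List Int} {s v j : Int}
    (h : (Bdict X l s).get? v = some j) :
    v ≤ X ∧ ∃ k : Nat, PySem.List.index? l v = some k ∧ j = s + (k : Int) := by
  rw [Bdict_get?] at h
  by_cases hvX : v ≤ X
  · rw [if_pos hvX] at h
    rcases hk : PySem.List.index? l v with _ | k
    · rw [hk] at h; simp at h
    · rw [hk] at h
      simp only [Option.map_some, Option.some_inj] at h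
      exact ⟨hvX, k, rfl, h.symm⟩
  · rw [if_neg hvX] at h; simp at h

theorem values_Bdict_mem (X : Int) (l : List Int) (s : Int) (j : Int) :
    j ∈ (Bdict X l s).values ↔ ∃ v, (Bdict X l s).get? v = some j := by
  constructor
  · intro hj
    simp only [PySem.Dict.values, List.mem_map] at hj
    obtain ⟨p, hp, hpj⟩ := hj
    exact ⟨p.1, by
      rw [(PySem.Dict.get?_eq_some_iff_mem_items _ _ _ (Bdict_nodup_keys X l s))]
      rw [← hpj]; simpa using hp⟩
  · rintro ⟨v, hv⟩
    have := (PySem.Dict.get?_eq_some_iff_mem_items _ _ _ (Bdict_nodup_keys X l s)).mp hv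
    simp only [PySem.Dict.values, List.mem_map]
    exact ⟨(v, j), this, rfl⟩

theorem values_Bdict_nodup (X : Int) (l : List Int) (s : Int) : (Bdict X l s).values.Nodup := by
  rw [PySem.Dict.values_eq_map_keys _ (Bdict_nodup_keys X l s) 0]
  apply List.Nodup.map_on _ (Bdict_nodup_keys X l s)
  intro v1 h1 v2 h2 heq
  have c1 := (PySem.Dict.contains_iff_mem_keys _ _).mpr h1
  have c2 := (PySem.Dict.contains_iff_mem_keys _ _).mpr h2
  rw [PySem.Dict.contains_eq_isSome_get?] at c1 c2
  rcases hg1 : (Bdict X l s).get? v1 with _ | j1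
  · rw [hg1] at c1; simp at c1
  rcases hg2 : (Bdict X l s).get? v2 with _ | j2
  · rw [hg2] at c2; simp at c2
  rw [PySem.Dict.getD_eq_get?_getD, PySem.Dict.getD_eq_get?_getD, hg1, hg2] at heq
  simp only [Option.getD_some] at heq
  subst heq
  obtain ⟨hx1, k1, hk1, hj1⟩ := Bdict_get?_some hg1
  obtain ⟨hx2, k2, hk2, hj2⟩ := Bdict_get?_some hg2
  have hkk : k1 = k2 := by omega
  subst hkk
  obtain ⟨hlt1, he1, _⟩ := PySem.List.getElem_of_index?_eq_some hk1
  obtain ⟨hlt2, he2, _⟩ := PySem.List.getElem_of_index?_eq_some hk2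
  rw [← he1, ← he2]

theorem sorted_values_eq_Fidx (X : Int) (l : List Int)
    (Fmem : ∀ (pre : List Int) (i : Int) (j : Int),
      j ∈ Fidx X l pre i ↔
        ∃ v, v ≤ X ∧ v ∉ pre ∧ ∃ k : Nat, PySem.List.index? l v = some k ∧ j = i + (k : Int))
    (Fpw : (Fidx X l [] 0).Pairwise (· < ·)) :
    PySem.List.sorted ((Bdict X l 0).values) (fun x => x) false = Fidx X l [] 0 := by
  apply PySem.List.sorted_eq_of_perm_of_pairwise_lt
  · apply (List.perm_ext_iff_of_nodup (Fpw.imp (fun h => ne_of_lt h)) (values_Bdict_nodup X l 0)).mpr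
    intro j
    rw [Fmem [] 0 j, values_Bdict_mem X l 0 j]
    constructor
    · rintro ⟨v, hvX, -, k, hk, hjk⟩
      refine ⟨v, ?_⟩
      rw [Bdict_get? X l 0 v, if_pos hvX, hk]
      simp [hjk]
    · rintro ⟨v, hv⟩
      obtain ⟨hvX, k, hk, hjk⟩ := Bdict_get?_some hv
      exact ⟨v, hvX, List.not_mem_nil, k, hk, by omega⟩
  · exact Fpw

theorem keyA (X : Int) (rest : List Int) : ∀ (pre acc : List Int),
    ((acc.length : Int) < X) →
    solLoopA (pre ++ rest) X rest (pre.length : Int) (acc.length : Int) =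
      (if X ≤ (((acc ++ Fidx X rest pre (pre.length : Int)).length : Nat) : Int)
       then (PySem.List.pyGet? (acc ++ Fidx X rest pre (pre.length : Int)) (X - 1)).getD (-1)
       else -1) := by
  induction rest with
  | nil =>
    intro pre acc hpos
    simp only [solLoopA, Fidx]
    rw [if_neg (by simp; omega)]
  | cons v t ih =>
    intro pre acc hpos
    have hslice : PySem.List.slice (pre ++ v :: t) none (some (pre.length : Int)) = pre := by
      rw [PySem.List.slice_to_natCast]
      simp
    simp only [solLoopA, Fidx, hslice]
    by_cases hc : v ≤ X ∧ v ∉ pre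
    · rw [if_pos hc, if_pos hc]
      by_cases hx : (acc.length : Int) + 1 = X
      · rw [if_pos hx]
        set zs := Fidx X t (pre ++ [v]) ((pre.length : Int) + 1) with hzs
        have hlen : X ≤ (((acc ++ (pre.length : Int) :: zs).length : Nat) : Int) := by
          simp; omega
        rw [if_pos hlen]
        have hx1 : X - 1 = ((acc.length : Nat) : Int) := by omega
        rw [hx1, PySem.List.pyGet?_append_length]
        rfl
      · rw [if_neg hx]
        have heq : solLoopA (pre ++ v :: t) X t ((pre.length : Int) + 1) ((acc.length : Int) + 1) =
            solLoopA ((pre ++ [v]) ++ t) X t (((pre ++ [v]).length : Nat) : Int)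
              (((acc ++ [(pre.length : Int)]).length : Nat) : Int) := by
          rw [show (pre ++ [v]) ++ t = pre ++ v :: t by simp]
          congr 1 <;> simp
        rw [heq, ih (pre ++ [v]) (acc ++ [(pre.length : Int)]) (by simp; omega)]
        rw [show ((((pre ++ [v]).length : Nat)) : Int) = (pre.length : Int) + 1 by simp]
        rw [show acc ++ [(pre.length : Int)] ++ Fidx X t (pre ++ [v]) ((pre.length : Int) + 1) =
              acc ++ (pre.length : Int) :: Fidx X t (pre ++ [v]) ((pre.length : Int) + 1) by simp]
    · rw [if_neg hc, if_neg hc]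
      rw [if_neg (show ¬ ((acc.length : Int) = X) by omega)]
      have heq : solLoopA (pre ++ v :: t) X t ((pre.length : Int) + 1) ((acc.length : Int)) =
          solLoopA ((pre ++ [v]) ++ t) X t (((pre ++ [v]).length : Nat) : Int) ((acc.length : Nat) : Int) := by
        rw [show (pre ++ [v]) ++ t = pre ++ v :: t by simp]
        congr 1; simp
      rw [heq, ih (pre ++ [v]) acc hpos]
      rw [show ((((pre ++ [v]).length : Nat)) : Int) = (pre.length : Int) + 1 by simp]

-- B's dict-building loop rewritten as a foldr (reverse.foldl = foldr), then reduced to Fidx.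
theorem alt_eq (X : Int) (A : List Int) :
    solution_alt X A =
      (if 1 ≤ X ∧ X ≤ ((Fidx X A [] 0).length : Int)
       then (PySem.List.pyGet? (Fidx X A [] 0) (X - 1)).getD (-1) else -1) := by
  have hfold : ((PySem.List.enumerate A).reverse).foldl
      (fun d p => if p.2 ≤ X then PySem.Dict.insert d p.2 p.1 else d) PySem.Dict.empty = Bdict X A 0 := by
    rw [List.foldl_reverse]
    rfl
  simp only [solution_alt, hfold,
    sorted_values_eq_Fidx X A (Fidx_mem X A) (Fidx_pairwise X A [] 0)]

-- ===== VERDICT (by name: the statement is the Claim_ definition above) =====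
theorem solution_spec : Claim_equal_solution := by
  intro X A _
  unfold Spec_solution
  rw [alt_eq]
  unfold solution
  by_cases hg : X ≤ 0 ∨ A.length = 0
  · rw [if_pos hg]
    rcases hg with hx | ha
    · rw [if_neg (by rintro ⟨h1, _⟩; omega)]
    · have : A = [] := List.length_eq_zero_iff.mp ha
      subst this
      simp [Fidx]
      omega
  · push Not at hg
    obtain ⟨hx, hne⟩ := hg
    have hx1 : 1 ≤ X := by omega
    rw [if_neg (by push Not; exact ⟨hx, hne⟩)]
    match A, hne with
    | a0 :: rest, _ =>
      simp only [Fidx, List.not_mem_nil, not_false_iff, and_true, List.nil_append, zero_add]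
      by_cases ha0 : a0 ≤ X
      · simp only [if_pos ha0]
        by_cases hX1 : (1 : Int) = X
        · subst hX1
          rw [if_pos rfl,
              if_pos (show (1 : Int) ≤ 1 ∧ (1 : Int) ≤ (((0 :: Fidx 1 rest [a0] 1 : List Int).length : Nat) : Int)
                from ⟨le_refl 1, by simp⟩)]
          rw [show (1 : Int) - 1 = ((0 : Nat) : Int) by norm_num, PySem.List.pyGet?_natCast]
          simp
        · rw [if_neg hX1]
          have h : solLoopA (a0 :: rest) X rest 1 1 =
              (if X ≤ (((0 :: Fidx X rest [a0] 1 : List Int).length : Nat) : Int)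
               then (PySem.List.pyGet? ((0 : Int) :: Fidx X rest [a0] 1) (X - 1)).getD (-1) else -1) := by
            simpa using keyA X rest [a0] [(0 : Int)] (by simp; omega)
          rw [h]
          by_cases hL : X ≤ (((0 :: Fidx X rest [a0] 1 : List Int).length : Nat) : Int)
          · rw [if_pos hL, if_pos ⟨hx1, hL⟩]
          · rw [if_neg hL, if_neg (fun h' => hL h'.2)]
      · simp only [if_neg ha0]
        have h : solLoopA (a0 :: rest) X rest 1 0 =
            (if X ≤ (((Fidx X rest [a0] 1).length : Nat) : Int)
             then (PySem.List.pyGet? (Fidx X rest [a0] 1) (X - 1)).getD (-1) else -1) := by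
          simpa using keyA X rest [a0] [] (by simp; omega)
        rw [h]
        by_cases hL : X ≤ (((Fidx X rest [a0] 1).length : Nat) : Int)
        · rw [if_pos hL, if_pos ⟨hx1, hL⟩]
        · rw [if_neg hL, if_neg (fun h' => hL h'.2)]
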